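-- pv_equiv track=rewrite | github.com/Hari-Kec/JourneyStamp | app/utils/tag_generator.py | enrich_tags
-- ===== SOURCE A (Python) =====
-- def enrich_tags(role, visual_tags, gps=None):
--     role = role.lower()
--     visual_tags = [tag.lower() for tag in visual_tags]
--
--     # Default output
--     final_tags = []
--
--     # Rule examples (you can expand)
--     if role == "bank officer":
--         if "document" in visual_tags or "paper" in visual_tags:
--             final_tags.append("Document Pickup")
--         if "chair" in visual_tags or "desk" in visual_tags:
--             final_tags.append("Client Office")
--         if "man" in visual_tags or "person" in visual_tags:
--             final_tags.append("KYC Visit")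
--
--     elif role == "delivery executive":
--         if "package" in visual_tags or "box" in visual_tags:
--             final_tags.append("Package Delivered")
--         if "door" in visual_tags or "home" in visual_tags:
--             final_tags.append("Client Home")
--
--     elif role == "field agent":
--         if "pen" in visual_tags or "signature" in visual_tags:
--             final_tags.append("Form Filled")
--         if "car" in visual_tags or "road" in visual_tags:
--             final_tags.append("On-Site Visit")
--
--     elif role == "surveyor":
--         if "building" in visual_tags or "structure" in visual_tags:
--             final_tags.append("Site Survey")
--         if "helmet" in visual_tags:
--             final_tags.append("Construction Visit")
--
--     # Fallback tag if nothing matches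
--     if not final_tags:
--         final_tags.append("General Field Visit")
--
--     return final_tags
-- ===== SOURCE B (Python) =====
-- # Inverted index: one pass over the visual tags looks each (role, tag) pair up
-- # directly; triggered outputs are deduplicated and emitted in priority order.
-- TRIGGERS = {
--     ("bank officer", "document"): "Document Pickup",
--     ("bank officer", "paper"): "Document Pickup",
--     ("bank officer", "chair"): "Client Office",
--     ("bank officer", "desk"): "Client Office",
--     ("bank officer", "man"): "KYC Visit",
--     ("bank officer", "person"): "KYC Visit",
--     ("delivery executive", "package"): "Package Delivered",
--     ("delivery executive", "box"): "Package Delivered",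
--     ("delivery executive", "door"): "Client Home",
--     ("delivery executive", "home"): "Client Home",
--     ("field agent", "pen"): "Form Filled",
--     ("field agent", "signature"): "Form Filled",
--     ("field agent", "car"): "On-Site Visit",
--     ("field agent", "road"): "On-Site Visit",
--     ("surveyor", "building"): "Site Survey",
--     ("surveyor", "structure"): "Site Survey",
--     ("surveyor", "helmet"): "Construction Visit",
-- }
-- RANK = {
--     "Document Pickup": 0, "Client Office": 1, "KYC Visit": 2,
--     "Package Delivered": 0, "Client Home": 1,
--     "Form Filled": 0, "On-Site Visit": 1,
--     "Site Survey": 0, "Construction Visit": 1,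
-- }
--
--
-- def enrich_tags(role, visual_tags, gps=None):
--     r = role.lower()
--     hits = set()
--     for t in visual_tags:
--         out = TRIGGERS.get((r, t.lower()))
--         if out is not None:
--             hits.add(out)
--     return sorted(hits, key=RANK.get) or ["General Field Visit"]
-- ===== Notes on version B (the rewrite author's own statement) =====
-- stated objective: alternative
-- what changed: Inverts the traversal: instead of A's per-role cascade of membership scans over the tag list, B makes one pass over the visual tags through a (role, tag) -> output inverted index, deduplicates triggered outputs in a set, and emits them sorted by a priority rank that reproduces A's rule order.
import Mathlib
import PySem

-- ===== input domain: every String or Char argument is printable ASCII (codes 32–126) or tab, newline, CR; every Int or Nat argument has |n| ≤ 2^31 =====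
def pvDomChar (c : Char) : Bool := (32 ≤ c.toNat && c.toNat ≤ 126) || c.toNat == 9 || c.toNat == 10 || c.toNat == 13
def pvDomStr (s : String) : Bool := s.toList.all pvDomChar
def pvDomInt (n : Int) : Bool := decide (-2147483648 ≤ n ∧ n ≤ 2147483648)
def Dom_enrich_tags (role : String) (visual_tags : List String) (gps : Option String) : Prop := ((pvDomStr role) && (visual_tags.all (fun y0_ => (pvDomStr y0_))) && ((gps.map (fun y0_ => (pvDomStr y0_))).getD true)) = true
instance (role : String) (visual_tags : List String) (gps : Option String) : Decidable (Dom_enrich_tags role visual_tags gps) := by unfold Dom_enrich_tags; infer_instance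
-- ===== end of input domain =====

-- B inverts A's rule scan: one pass over the visual tags through a (role, tag) -> output index, deduplicated, then emitted in priority order (objective: alternative).


-- ===== PORT A =====
def enrich_tags (role : String) (visual_tags : List String) (gps : Option String) : List String :=
  let r := PySem.Str.lower role
  let v := visual_tags.map PySem.Str.lower
  let final : List String := []
  let final :=
    if r = "bank officer" then
      let final := if "document" ∈ v ∨ "paper" ∈ v then final ++ ["Document Pickup"] else final
      let final := if "chair" ∈ v ∨ "desk" ∈ v then final ++ ["Client Office"] else final
      if "man" ∈ v ∨ "person" ∈ v then final ++ ["KYC Visit"] else final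
    else if r = "delivery executive" then
      let final := if "package" ∈ v ∨ "box" ∈ v then final ++ ["Package Delivered"] else final
      if "door" ∈ v ∨ "home" ∈ v then final ++ ["Client Home"] else final
    else if r = "field agent" then
      let final := if "pen" ∈ v ∨ "signature" ∈ v then final ++ ["Form Filled"] else final
      if "car" ∈ v ∨ "road" ∈ v then final ++ ["On-Site Visit"] else final
    else if r = "surveyor" then
      let final := if "building" ∈ v ∨ "structure" ∈ v then final ++ ["Site Survey"] else final
      if "helmet" ∈ v then final ++ ["Construction Visit"] else final
    else final
  if final = [] then final ++ ["General Field Visit"] else final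

-- ===== PORT B =====
def pvTriggers : PySem.Dict (String × String) String :=
  PySem.Dict.mk
  [(("bank officer", "document"), "Document Pickup"),
   (("bank officer", "paper"), "Document Pickup"),
   (("bank officer", "chair"), "Client Office"),
   (("bank officer", "desk"), "Client Office"),
   (("bank officer", "man"), "KYC Visit"),
   (("bank officer", "person"), "KYC Visit"),
   (("delivery executive", "package"), "Package Delivered"),
   (("delivery executive", "box"), "Package Delivered"),
   (("delivery executive", "door"), "Client Home"),
   (("delivery executive", "home"), "Client Home"),
   (("field agent", "pen"), "Form Filled"),
   (("field agent", "signature"), "Form Filled"),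
   (("field agent", "car"), "On-Site Visit"),
   (("field agent", "road"), "On-Site Visit"),
   (("surveyor", "building"), "Site Survey"),
   (("surveyor", "structure"), "Site Survey"),
   (("surveyor", "helmet"), "Construction Visit")]

def pvRank : PySem.Dict String Int :=
  PySem.Dict.mk
  [("Document Pickup", 0), ("Client Office", 1), ("KYC Visit", 2),
   ("Package Delivered", 0), ("Client Home", 1),
   ("Form Filled", 0), ("On-Site Visit", 1),
   ("Site Survey", 0), ("Construction Visit", 1)]

-- the 'for t in visual_tags' loop of Source B: collect triggered output tags into a set
def pvCollect (r : String) (ts : List String) (s : PySem.Set String) : PySem.Set String :=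
  ts.foldl (fun hits t =>
    match pvTriggers.get? (r, PySem.Str.lower t) with
    | some out => PySem.Set.add hits out
    | none => hits) s

def enrich_tags_alt (role : String) (visual_tags : List String) (gps : Option String) : List String :=
  let r := PySem.Str.lower role
  let hits : PySem.Set String := pvCollect r visual_tags PySem.Set.empty
  -- RANK.get never returns None on a member of hits; getD 0 is the same total lookup
  let ordered := PySem.List.sorted hits (fun o => pvRank.getD o 0)
  if ordered = [] then ["General Field Visit"] else ordered

-- ===== PRECONDITION & SPEC =====
def Spec_enrich_tags (role : String) (visual_tags : List String) (gps : Option String) (out : List String) : Prop := out = enrich_tags_alt role visual_tags gps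
instance (role : String) (visual_tags : List String) (gps : Option String) (out : List String) : Decidable (Spec_enrich_tags role visual_tags gps out) := by unfold Spec_enrich_tags; infer_instance

-- ===== CLAIM (what is proved, stated in full; the proofs are below) =====
def Claim_equal_enrich_tags : Prop := ∀ (role : String) (visual_tags : List String) (gps : Option String), Dom_enrich_tags role visual_tags gps → Spec_enrich_tags role visual_tags gps (enrich_tags role visual_tags gps)

-- ===== LEMMAS AND PROOFS =====
theorem mem_pvCollect (r : String) (ts : List String) (s : PySem.Set String) (o : String) :
    o ∈ pvCollect r ts s ↔ o ∈ s ∨ ∃ t ∈ ts, pvTriggers.get? (r, PySem.Str.lower t) = some o := by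
  induction ts generalizing s with
  | nil => simp [pvCollect]
  | cons t ts ih =>
    simp only [pvCollect, List.foldl_cons] at ih ⊢
    cases h : pvTriggers.get? (r, PySem.Str.lower t) with
    | none => rw [ih]; simp [h]
    | some out =>
      rw [ih]
      simp only [PySem.Set.mem_add, List.mem_cons]
      constructor
      · rintro (⟨hs | rfl⟩ | ⟨u, hu, hq⟩)
        · exact Or.inl hs
        · exact Or.inr ⟨t, Or.inl rfl, h⟩
        · exact Or.inr ⟨u, Or.inr hu, hq⟩
      · rintro (hs | ⟨u, (rfl | hu), hq⟩)
        · exact Or.inl (Or.inl hs)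
        · rw [h] at hq; exact Or.inl (Or.inr (Option.some.injEq _ _ ▸ hq).symm)
        · exact Or.inr ⟨u, hu, hq⟩

theorem nodup_pvCollect (r : String) (ts : List String) (s : PySem.Set String)
    (hs : s.Nodup) : (pvCollect r ts s).Nodup := by
  induction ts generalizing s with
  | nil => exact hs
  | cons t ts ih =>
    simp only [pvCollect, List.foldl_cons] at ih ⊢
    cases h : pvTriggers.get? (r, PySem.Str.lower t) with
    | none => exact ih _ hs
    | some out => exact ih _ (PySem.Set.nodup_add s out hs)

-- sorted-by-rank of a nodup sublist of a strictly rank-increasing universe is the universe filtered by membership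
theorem sorted_filter_of_sub (hits univ : List String) (k : String → Int)
    (hnd : hits.Nodup) (hU : univ.Pairwise (fun a b => k a < k b))
    (hsub : ∀ o ∈ hits, o ∈ univ) :
    PySem.List.sorted hits k = univ.filter (fun o => decide (o ∈ hits)) := by
  have hndU : univ.Nodup := hU.imp (fun {a b} h he => by subst he; exact lt_irrefl _ h)
  apply PySem.List.sorted_eq_of_perm_of_pairwise_lt
  · refine (List.perm_ext_iff_of_nodup (hndU.filter _) hnd).mpr ?_
    intro a
    simp only [List.mem_filter, decide_eq_true_eq]
    exact ⟨fun h => h.2, fun h => ⟨hsub a h, h⟩⟩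
  · exact hU.filter _

theorem lookup_bank (x : String) : pvTriggers.get? ("bank officer", x) =
    if "document" = x ∨ "paper" = x then some "Document Pickup"
    else if "chair" = x ∨ "desk" = x then some "Client Office"
    else if "man" = x ∨ "person" = x then some "KYC Visit" else none := by
  simp only [pvTriggers, PySem.Dict.get?_mk_cons, beq_iff_eq, Prod.mk.injEq, String.reduceEq,
    true_and, false_and, if_false]
  split_ifs <;> simp_all [PySem.Dict.get?]

theorem lookup_delivery (x : String) : pvTriggers.get? ("delivery executive", x) =
    if "package" = x ∨ "box" = x then some "Package Delivered"
    else if "door" = x ∨ "home" = x then some "Client Home" else none := by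
  simp only [pvTriggers, PySem.Dict.get?_mk_cons, beq_iff_eq, Prod.mk.injEq, String.reduceEq,
    true_and, false_and, if_false]
  split_ifs <;> simp_all [PySem.Dict.get?]

theorem lookup_field (x : String) : pvTriggers.get? ("field agent", x) =
    if "pen" = x ∨ "signature" = x then some "Form Filled"
    else if "car" = x ∨ "road" = x then some "On-Site Visit" else none := by
  simp only [pvTriggers, PySem.Dict.get?_mk_cons, beq_iff_eq, Prod.mk.injEq, String.reduceEq,
    true_and, false_and, if_false]
  split_ifs <;> simp_all [PySem.Dict.get?]

theorem lookup_surveyor (x : String) : pvTriggers.get? ("surveyor", x) =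
    if "building" = x ∨ "structure" = x then some "Site Survey"
    else if "helmet" = x then some "Construction Visit" else none := by
  simp only [pvTriggers, PySem.Dict.get?_mk_cons, beq_iff_eq, Prod.mk.injEq, String.reduceEq,
    true_and, false_and, if_false]
  split_ifs <;> simp_all [PySem.Dict.get?]

theorem lookup_other (r x : String) (h1 : r ≠ "bank officer") (h2 : r ≠ "delivery executive")
    (h3 : r ≠ "field agent") (h4 : r ≠ "surveyor") : pvTriggers.get? (r, x) = none := by
  simp [pvTriggers, Prod.mk.injEq, PySem.Dict.get?,
    Ne.symm h1, Ne.symm h2, Ne.symm h3, Ne.symm h4]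

theorem pvCollect_no_role (r : String) (ts : List String)
    (h : ∀ x, pvTriggers.get? (r, x) = none) : pvCollect r ts [] = [] := by
  induction ts with
  | nil => rfl
  | cons t ts ih => simpa [pvCollect, h] using ih

-- ===== VERDICT (by name: the statement is the Claim_ definition above) =====
set_option maxHeartbeats 1000000 in
theorem enrich_tags_spec : Claim_equal_enrich_tags := by
  intro role visual_tags gps _
  unfold Spec_enrich_tags enrich_tags enrich_tags_alt
  by_cases h1 : PySem.Str.lower role = "bank officer"
  · simp only [h1, String.reduceEq, reduceIte, PySem.Set.empty]
    have hnd := nodup_pvCollect "bank officer" visual_tags [] List.nodup_nil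
    have hsub : ∀ o ∈ pvCollect "bank officer" visual_tags [],
        o ∈ ["Document Pickup", "Client Office", "KYC Visit"] := by
      intro o ho
      rcases (mem_pvCollect _ _ _ _).mp ho with hc | ⟨t, _, hq⟩
      · simp at hc
      · rw [lookup_bank] at hq; split_ifs at hq <;> simp_all
    have hs := sorted_filter_of_sub _ _ (fun o => pvRank.getD o 0) hnd (by decide) hsub
    have m1 : "Document Pickup" ∈ pvCollect "bank officer" visual_tags [] ↔
        ("document" ∈ visual_tags.map PySem.Str.lower ∨ "paper" ∈ visual_tags.map PySem.Str.lower) := by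
      have hl : ∀ t : String, pvTriggers.get? ("bank officer", PySem.Str.lower t) = some "Document Pickup" ↔
          ("document" = PySem.Str.lower t ∨ "paper" = PySem.Str.lower t) := by
        intro t; generalize PySem.Str.lower t = y; rw [lookup_bank]; split_ifs <;> (try rcases ‹_ ∨ _› with rfl | rfl) <;> simp_all
      rw [mem_pvCollect]
      simp only [hl, List.mem_map, List.not_mem_nil, false_or, eq_comm]
      aesop
    have m2 : "Client Office" ∈ pvCollect "bank officer" visual_tags [] ↔
        ("chair" ∈ visual_tags.map PySem.Str.lower ∨ "desk" ∈ visual_tags.map PySem.Str.lower) := by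
      have hl : ∀ t : String, pvTriggers.get? ("bank officer", PySem.Str.lower t) = some "Client Office" ↔
          ("chair" = PySem.Str.lower t ∨ "desk" = PySem.Str.lower t) := by
        intro t; generalize PySem.Str.lower t = y; rw [lookup_bank]; split_ifs <;> (try rcases ‹_ ∨ _› with rfl | rfl) <;> simp_all
      rw [mem_pvCollect]
      simp only [hl, List.mem_map, List.not_mem_nil, false_or, eq_comm]
      aesop
    have m3 : "KYC Visit" ∈ pvCollect "bank officer" visual_tags [] ↔
        ("man" ∈ visual_tags.map PySem.Str.lower ∨ "person" ∈ visual_tags.map PySem.Str.lower) := by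
      have hl : ∀ t : String, pvTriggers.get? ("bank officer", PySem.Str.lower t) = some "KYC Visit" ↔
          ("man" = PySem.Str.lower t ∨ "person" = PySem.Str.lower t) := by
        intro t; generalize PySem.Str.lower t = y; rw [lookup_bank]; split_ifs <;> (try rcases ‹_ ∨ _› with rfl | rfl) <;> simp_all
      rw [mem_pvCollect]
      simp only [hl, List.mem_map, List.not_mem_nil, false_or, eq_comm]
      aesop
    rw [hs]
    simp only [List.filter_cons, List.filter_nil, decide_eq_true_eq, m1, m2, m3]
    split_ifs <;> first | rfl | simp_all
  by_cases h2 : PySem.Str.lower role = "delivery executive"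
  · simp only [h2, String.reduceEq, reduceIte, PySem.Set.empty]
    have hnd := nodup_pvCollect "delivery executive" visual_tags [] List.nodup_nil
    have hsub : ∀ o ∈ pvCollect "delivery executive" visual_tags [],
        o ∈ ["Package Delivered", "Client Home"] := by
      intro o ho
      rcases (mem_pvCollect _ _ _ _).mp ho with hc | ⟨t, _, hq⟩
      · simp at hc
      · rw [lookup_delivery] at hq; split_ifs at hq <;> simp_all
    have hs := sorted_filter_of_sub _ _ (fun o => pvRank.getD o 0) hnd (by decide) hsub
    have m1 : "Package Delivered" ∈ pvCollect "delivery executive" visual_tags [] ↔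
        ("package" ∈ visual_tags.map PySem.Str.lower ∨ "box" ∈ visual_tags.map PySem.Str.lower) := by
      have hl : ∀ t : String, pvTriggers.get? ("delivery executive", PySem.Str.lower t) = some "Package Delivered" ↔
          ("package" = PySem.Str.lower t ∨ "box" = PySem.Str.lower t) := by
        intro t; generalize PySem.Str.lower t = y; rw [lookup_delivery]; split_ifs <;> (try rcases ‹_ ∨ _› with rfl | rfl) <;> simp_all
      rw [mem_pvCollect]
      simp only [hl, List.mem_map, List.not_mem_nil, false_or, eq_comm]
      aesop
    have m2 : "Client Home" ∈ pvCollect "delivery executive" visual_tags [] ↔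
        ("door" ∈ visual_tags.map PySem.Str.lower ∨ "home" ∈ visual_tags.map PySem.Str.lower) := by
      have hl : ∀ t : String, pvTriggers.get? ("delivery executive", PySem.Str.lower t) = some "Client Home" ↔
          ("door" = PySem.Str.lower t ∨ "home" = PySem.Str.lower t) := by
        intro t; generalize PySem.Str.lower t = y; rw [lookup_delivery]; split_ifs <;> (try rcases ‹_ ∨ _› with rfl | rfl) <;> simp_all
      rw [mem_pvCollect]
      simp only [hl, List.mem_map, List.not_mem_nil, false_or, eq_comm]
      aesop
    rw [hs]
    simp only [List.filter_cons, List.filter_nil, decide_eq_true_eq, m1, m2]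
    split_ifs <;> first | rfl | simp_all
  by_cases h3 : PySem.Str.lower role = "field agent"
  · simp only [h3, String.reduceEq, reduceIte, PySem.Set.empty]
    have hnd := nodup_pvCollect "field agent" visual_tags [] List.nodup_nil
    have hsub : ∀ o ∈ pvCollect "field agent" visual_tags [],
        o ∈ ["Form Filled", "On-Site Visit"] := by
      intro o ho
      rcases (mem_pvCollect _ _ _ _).mp ho with hc | ⟨t, _, hq⟩
      · simp at hc
      · rw [lookup_field] at hq; split_ifs at hq <;> simp_all
    have hs := sorted_filter_of_sub _ _ (fun o => pvRank.getD o 0) hnd (by decide) hsub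
    have m1 : "Form Filled" ∈ pvCollect "field agent" visual_tags [] ↔
        ("pen" ∈ visual_tags.map PySem.Str.lower ∨ "signature" ∈ visual_tags.map PySem.Str.lower) := by
      have hl : ∀ t : String, pvTriggers.get? ("field agent", PySem.Str.lower t) = some "Form Filled" ↔
          ("pen" = PySem.Str.lower t ∨ "signature" = PySem.Str.lower t) := by
        intro t; generalize PySem.Str.lower t = y; rw [lookup_field]; split_ifs <;> (try rcases ‹_ ∨ _› with rfl | rfl) <;> simp_all
      rw [mem_pvCollect]
      simp only [hl, List.mem_map, List.not_mem_nil, false_or, eq_comm]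
      aesop
    have m2 : "On-Site Visit" ∈ pvCollect "field agent" visual_tags [] ↔
        ("car" ∈ visual_tags.map PySem.Str.lower ∨ "road" ∈ visual_tags.map PySem.Str.lower) := by
      have hl : ∀ t : String, pvTriggers.get? ("field agent", PySem.Str.lower t) = some "On-Site Visit" ↔
          ("car" = PySem.Str.lower t ∨ "road" = PySem.Str.lower t) := by
        intro t; generalize PySem.Str.lower t = y; rw [lookup_field]; split_ifs <;> (try rcases ‹_ ∨ _› with rfl | rfl) <;> simp_all
      rw [mem_pvCollect]
      simp only [hl, List.mem_map, List.not_mem_nil, false_or, eq_comm]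
      aesop
    rw [hs]
    simp only [List.filter_cons, List.filter_nil, decide_eq_true_eq, m1, m2]
    split_ifs <;> first | rfl | simp_all
  by_cases h4 : PySem.Str.lower role = "surveyor"
  · simp only [h4, String.reduceEq, reduceIte, PySem.Set.empty]
    have hnd := nodup_pvCollect "surveyor" visual_tags [] List.nodup_nil
    have hsub : ∀ o ∈ pvCollect "surveyor" visual_tags [],
        o ∈ ["Site Survey", "Construction Visit"] := by
      intro o ho
      rcases (mem_pvCollect _ _ _ _).mp ho with hc | ⟨t, _, hq⟩
      · simp at hc
      · rw [lookup_surveyor] at hq; split_ifs at hq <;> simp_all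
    have hs := sorted_filter_of_sub _ _ (fun o => pvRank.getD o 0) hnd (by decide) hsub
    have m1 : "Site Survey" ∈ pvCollect "surveyor" visual_tags [] ↔
        ("building" ∈ visual_tags.map PySem.Str.lower ∨ "structure" ∈ visual_tags.map PySem.Str.lower) := by
      have hl : ∀ t : String, pvTriggers.get? ("surveyor", PySem.Str.lower t) = some "Site Survey" ↔
          ("building" = PySem.Str.lower t ∨ "structure" = PySem.Str.lower t) := by
        intro t; generalize PySem.Str.lower t = y; rw [lookup_surveyor]; split_ifs <;> (try rcases ‹_ ∨ _› with rfl | rfl) <;> simp_all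
      rw [mem_pvCollect]
      simp only [hl, List.mem_map, List.not_mem_nil, false_or, eq_comm]
      aesop
    have m2 : "Construction Visit" ∈ pvCollect "surveyor" visual_tags [] ↔
        ("helmet" ∈ visual_tags.map PySem.Str.lower) := by
      have hl : ∀ t : String, pvTriggers.get? ("surveyor", PySem.Str.lower t) = some "Construction Visit" ↔
          ("helmet" = PySem.Str.lower t) := by
        intro t; generalize PySem.Str.lower t = y; rw [lookup_surveyor]; split_ifs <;> (try rcases ‹_ ∨ _› with rfl | rfl) <;> simp_all
      rw [mem_pvCollect]
      simp only [hl, List.mem_map, List.not_mem_nil, false_or, eq_comm]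
    rw [hs]
    simp only [List.filter_cons, List.filter_nil, decide_eq_true_eq, m1, m2]
    split_ifs <;> first | rfl | simp_all
  · simp only [h1, h2, h3, h4, reduceIte, PySem.Set.empty]
    have hc : pvCollect (PySem.Str.lower role) visual_tags [] = [] :=
      pvCollect_no_role _ _ (fun x => lookup_other _ x h1 h2 h3 h4)
    simp [hc, PySem.List.sorted]
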